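-- pv_equiv track=rewrite | github.com/Ki-Hong-Kim/BackJoon | phone_book.py | solution
-- ===== SOURCE A (Python) =====
-- def solution(phone_book):
--
--     for a in range(len(phone_book)):
--         k1 = len(phone_book[a])
--
--         for b in range(a+1, len(phone_book)):
--             k2 = len(phone_book[b])
--
--             if phone_book[a] in phone_book[b][:k1] or phone_book[b] in phone_book[a][:k2] :
--                 return False
--     return True
-- ===== SOURCE B (Python) =====
-- def solution(phone_book):
--     seen = set()
--     for s in phone_book:
--         if s in seen:
--             return False
--         seen.add(s)
--     for s in phone_book:
--         for i in range(len(s)):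
--             if s[:i] in seen:
--                 return False
--     return True
-- ===== Notes on version B (the rewrite author's own statement) =====
-- stated objective: alternative
-- what changed: Replaced the all-pairs substring scan with a hash-set pass: one duplicate check while building a set of all strings, then for each string a probe of its proper prefixes against the set (O(n*L) set lookups instead of O(n^2) pair tests).
import Mathlib
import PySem

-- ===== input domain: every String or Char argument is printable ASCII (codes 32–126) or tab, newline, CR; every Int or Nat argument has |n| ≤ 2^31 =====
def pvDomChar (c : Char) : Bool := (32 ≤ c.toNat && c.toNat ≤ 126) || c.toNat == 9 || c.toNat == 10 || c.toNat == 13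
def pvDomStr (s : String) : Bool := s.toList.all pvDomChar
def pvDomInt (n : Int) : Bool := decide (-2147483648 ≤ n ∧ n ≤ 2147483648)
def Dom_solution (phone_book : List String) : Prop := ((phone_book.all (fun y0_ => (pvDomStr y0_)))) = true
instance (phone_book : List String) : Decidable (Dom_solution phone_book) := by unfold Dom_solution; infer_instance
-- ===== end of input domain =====

-- B replaces A's all-pairs substring scan with a hash-set of the strings, checked for
-- duplicates and then probed with each string's proper prefixes (objective: alternative algorithm).

-- ===== PORT A =====
-- literal transliteration of A's doubly indexed loop with early return False
def solution (phone_book : List String) : Bool :=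
  (PySem.List.pyRange 0 (PySem.List.len phone_book) 1).all (fun a =>
    let k1 := PySem.Str.len (PySem.List.pyGetD phone_book a "")
    (PySem.List.pyRange (a + 1) (PySem.List.len phone_book) 1).all (fun b =>
      let k2 := PySem.Str.len (PySem.List.pyGetD phone_book b "")
      !(PySem.Str.isIn (PySem.List.pyGetD phone_book a "")
          (PySem.Str.slice (PySem.List.pyGetD phone_book b "") none (some k1)) ||
        PySem.Str.isIn (PySem.List.pyGetD phone_book b "")
          (PySem.Str.slice (PySem.List.pyGetD phone_book a "") none (some k2)))))

-- ===== PORT B =====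
-- first loop of Source B: builds the set `seen`, returning none on the early `return False` (duplicate)
def buildSeen : List String → PySem.Set String → Option (PySem.Set String)
  | [], seen => some seen
  | s :: rest, seen =>
      if PySem.Set.contains seen s then none
      else buildSeen rest (PySem.Set.add seen s)

def solution_alt (phone_book : List String) : Bool :=
  match buildSeen phone_book PySem.Set.empty with
  | none => false
  | some seen =>
      phone_book.all (fun s =>
        (PySem.List.pyRange 0 (PySem.Str.len s) 1).all (fun i =>
          !(PySem.Set.contains seen (PySem.Str.slice s none (some i)))))

-- ===== PRECONDITION & SPEC =====
def Spec_solution (phone_book : List String) (out : Bool) : Prop := out = solution_alt phone_book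
instance (phone_book : List String) (out : Bool) : Decidable (Spec_solution phone_book out) := by unfold Spec_solution; infer_instance

-- ===== CLAIM (what is proved, stated in full; the proofs are below) =====
def Claim_equal_solution : Prop := ∀ (phone_book : List String), Dom_solution phone_book → Spec_solution phone_book (solution phone_book)

-- ===== LEMMAS AND PROOFS =====

-- some string of the list is a prefix of another one (at a different position)
def Bad (pb : List String) : Prop :=
  ∃ i j : Nat, ∃ hi : i < pb.length, ∃ hj : j < pb.length,
    i ≠ j ∧ pb[i].toList <+: pb[j].toList

theorem infix_take_length_iff_prefix {l t : List Char} :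
    l <:+: t.take l.length ↔ l <+: t := by
  constructor
  · rintro ⟨p, q, hpq⟩
    have hlen : p.length + (l.length + q.length) = (t.take l.length).length := by
      simpa [List.length_append] using congrArg List.length hpq
    have hle : (t.take l.length).length ≤ l.length := by simp
    have hp0 : p.length = 0 := by omega
    have hq0 : q.length = 0 := by omega
    have hp : p = [] := List.length_eq_zero_iff.mp hp0
    have hq : q = [] := List.length_eq_zero_iff.mp hq0
    subst hp; subst hq
    simp only [List.nil_append, List.append_nil] at hpq
    exact List.prefix_iff_eq_take.mpr hpq
  · intro h
    have := List.prefix_iff_eq_take.mp h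
    exact this ▸ List.infix_refl _

theorem pairA (s t : String) :
    PySem.Str.isIn s (PySem.Str.slice t none (some (PySem.Str.len s))) = true ↔
      s.toList <+: t.toList := by
  rw [PySem.Str.isIn_iff_infix]
  have hsl : (PySem.Str.slice t none (some (PySem.Str.len s))).toList
      = t.toList.take s.toList.length := by
    simp [pysem]
  rw [hsl, infix_take_length_iff_prefix]

theorem solutionA_true_iff (pb : List String) :
    solution pb = true ↔ ¬ Bad pb := by
  constructor
  · intro h ⟨i, j, hi, hj, hne, hpre⟩
    simp only [solution, List.all_eq_true, PySem.List.mem_pyRange_one, PySem.List.len_eq] at h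
    rcases Nat.lt_or_ge i j with hij | hij
    · have := h (i : Int) ⟨by omega, by omega⟩ (j : Int) ⟨by omega, by omega⟩
      rw [PySem.List.pyGetD_eq_getElem pb "" (by omega) (by omega),
          PySem.List.pyGetD_eq_getElem pb "" (by omega) (by omega)] at this
      simp only [Int.toNat_natCast, Bool.not_eq_true', Bool.or_eq_false_iff] at this
      exact absurd ((pairA _ _).mpr hpre) (by simp only [this.1]; exact Bool.false_ne_true)
    · have hji : j < i := lt_of_le_of_ne hij (fun e => hne e.symm)
      have := h (j : Int) ⟨by omega, by omega⟩ (i : Int) ⟨by omega, by omega⟩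
      rw [PySem.List.pyGetD_eq_getElem pb "" (by omega) (by omega),
          PySem.List.pyGetD_eq_getElem pb "" (by omega) (by omega)] at this
      simp only [Int.toNat_natCast, Bool.not_eq_true', Bool.or_eq_false_iff] at this
      exact absurd ((pairA _ _).mpr hpre) (by simp only [this.2]; exact Bool.false_ne_true)
  · intro h
    simp only [solution, List.all_eq_true, PySem.List.mem_pyRange_one, PySem.List.len_eq]
    intro a ⟨ha0, haN⟩ b ⟨hab, hbN⟩
    have hb0 : (0:Int) ≤ b := le_trans (by omega) hab
    have hiN : a.toNat < pb.length := by omega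
    have hjN : b.toNat < pb.length := by omega
    rw [PySem.List.pyGetD_eq_getElem pb "" ha0 haN, PySem.List.pyGetD_eq_getElem pb "" hb0 hbN]
    simp only [Bool.not_eq_true', Bool.or_eq_false_iff]
    constructor
    · by_contra hc
      simp only [Bool.not_eq_false] at hc
      exact h ⟨a.toNat, b.toNat, hiN, hjN, by omega, (pairA _ _).mp hc⟩
    · by_contra hc
      simp only [Bool.not_eq_false] at hc
      exact h ⟨b.toNat, a.toNat, hjN, hiN, by omega, (pairA _ _).mp hc⟩

theorem buildSeen_eq_some (xs : List String) :
    ∀ (seen t : PySem.Set String),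
      buildSeen xs seen = some t ↔ ((∀ x ∈ xs, x ∉ seen) ∧ xs.Nodup ∧ t = seen ++ xs) := by
  induction xs with
  | nil => intro seen t; simp [buildSeen, eq_comm]
  | cons s rest ih =>
      intro seen t
      simp only [buildSeen]
      by_cases hs : s ∈ seen
      · simp [hs]
      · rw [if_neg (by simp [hs])]
        have hadd : PySem.Set.add seen s = seen ++ [s] := by
          simp [PySem.Set.add, hs]  -- add appends a new element
        rw [ih, hadd]
        constructor
        · rintro ⟨h1, h2, h3⟩
          refine ⟨?_, ?_, by simpa using h3⟩
          · intro x hx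
            rcases List.mem_cons.mp hx with rfl | hx'
            · exact hs
            · exact fun hmem => h1 x hx' (by simp [hmem])
          · exact List.nodup_cons.mpr ⟨fun hmem => h1 s hmem (by simp), h2⟩
        · rintro ⟨h1, h2, h3⟩
          rcases List.nodup_cons.mp h2 with ⟨hsr, hnd⟩
          refine ⟨?_, hnd, by simpa using h3⟩
          intro x hx hmem
          rcases List.mem_append.mp hmem with hm | hm
          · exact h1 x (List.mem_cons_of_mem s hx) hm
          · have hxs : x = s := by simpa using hm
            exact hsr (hxs ▸ hx)

theorem solutionB_true_iff (pb : List String) :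
    solution_alt pb = true ↔
      pb.Nodup ∧ ∀ s ∈ pb, ∀ i : Nat, i < s.toList.length →
        ¬ ∃ t ∈ pb, t.toList = s.toList.take i := by
  unfold solution_alt
  rcases hbs : buildSeen pb PySem.Set.empty with _ | seen
  · simp only [Bool.false_eq_true, false_iff]
    rintro ⟨hnd, -⟩
    have : buildSeen pb PySem.Set.empty = some ([] ++ pb) :=
      (buildSeen_eq_some pb _ _).mpr ⟨by simp [PySem.Set.empty], hnd, rfl⟩
    rw [hbs] at this; exact absurd this (by simp)
  · obtain ⟨-, hnd, hseen⟩ := (buildSeen_eq_some pb _ _).mp hbs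
    have hseen' : seen = pb := by simpa [PySem.Set.empty] using hseen
    subst hseen'
    simp only [List.all_eq_true, PySem.List.mem_pyRange_one, PySem.Str.len_eq,
      Bool.not_eq_true', hnd, true_and]
    constructor
    · intro h s hs i hi
      rintro ⟨t, ht, htake⟩
      have := h s hs (i : Int) ⟨by positivity, by exact_mod_cast hi⟩
      rw [Bool.eq_false_iff] at this
      apply this
      rw [PySem.Set.contains_iff]
      have : (PySem.Str.slice s none (some (i : Int))).toList = s.toList.take i := by
        simp [pysem, PySem.List.slice_to _ (by positivity : (0:Int) ≤ (i:Int))]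
      have ht2 : t = PySem.Str.slice s none (some (i : Int)) :=
        String.toList_inj.mp (by rw [this, htake])
      exact ht2 ▸ ht
    · intro h s hs i ⟨hi0, hiN⟩
      rw [Bool.eq_false_iff]
      intro hc
      rw [PySem.Set.contains_iff] at hc
      refine h s hs i.toNat (by omega) ⟨_, hc, ?_⟩
      simp [pysem, PySem.List.slice_to _ hi0]

theorem bad_iff (pb : List String) :
    ¬ Bad pb ↔
      pb.Nodup ∧ ∀ s ∈ pb, ∀ i : Nat, i < s.toList.length →
        ¬ ∃ t ∈ pb, t.toList = s.toList.take i := by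
  constructor
  · intro h
    constructor
    · rw [List.nodup_iff_injective_get]
      intro ⟨i, hi⟩ ⟨j, hj⟩ hij
      simp only [List.get_eq_getElem] at hij
      by_contra hne
      exact h ⟨i, j, hi, hj, by simpa using hne, by rw [hij]⟩
    · intro s hs i hi ⟨t, ht, htake⟩
      obtain ⟨j, hj, hsj⟩ := List.mem_iff_getElem.mp hs
      obtain ⟨k, hk, htk⟩ := List.mem_iff_getElem.mp ht
      have hpre : pb[k].toList <+: pb[j].toList := by
        rw [htk, hsj, htake, List.prefix_iff_eq_take]
        simp [List.length_take]
      have hlt : pb[k].toList.length < pb[j].toList.length := by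
        rw [htk, hsj, htake]
        simp only [List.length_take]; omega
      exact h ⟨k, j, hk, hj, fun e => by subst e; omega, hpre⟩
  · rintro ⟨hnd, hnp⟩ ⟨i, j, hi, hj, hne, hpre⟩
    by_cases heq : pb[i] = pb[j]
    · rw [List.nodup_iff_injective_get] at hnd
      exact hne (by simpa using congrArg Fin.val (hnd (a₁ := ⟨i, hi⟩) (a₂ := ⟨j, hj⟩) (by simpa using heq)))
    · have hlen : pb[i].toList.length < pb[j].toList.length := by
        rcases lt_or_eq_of_le hpre.length_le with h | h
        · exact h
        · exact absurd (String.toList_inj.mp (hpre.eq_of_length h)) heq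
      exact hnp pb[j] (List.getElem_mem hj) pb[i].toList.length hlen
        ⟨pb[i], List.getElem_mem hi, List.prefix_iff_eq_take.mp hpre⟩

-- ===== VERDICT (by name: the statement is the Claim_ definition above) =====
theorem solution_spec : Claim_equal_solution := by
  intro pb _
  unfold Spec_solution
  have hiff : solution pb = true ↔ solution_alt pb = true := by
    rw [solutionA_true_iff, solutionB_true_iff, bad_iff]
  cases ha : solution pb
  · cases hb : solution_alt pb
    · rfl
    · exact absurd (hiff.mpr hb) (by simp [ha])
  · exact (hiff.mp ha).symm
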